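-- pv_equiv track=rewrite | github.com/adeadzeplin/seniordesign | Source/CVS_/CVS_circuit_calculations.py | total_Power
-- ===== SOURCE A (Python) =====
-- def total_Power(renamed_list):
--     esti_power = 0
--     for i in renamed_list:
--         if i == 0 or i == 1:  #inputs/outputs
--             esti_power += 0
--         elif i == 6:
--             esti_power += 20  #uA
--         elif i == 7:
--             esti_power += 40  #uA
--         elif i == 8:
--             esti_power += 0  #LUCA space gate
--         elif i == 9:
--             esti_power += 40
--         else:
--             esti_power += 40  #uA
--     return esti_power
-- ===== SOURCE B (Python) =====
-- def total_Power(renamed_list):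
--     n = len(renamed_list)
--     zeros = sum(1 for x in renamed_list if x == 0 or x == 1 or x == 8)
--     sixes = sum(1 for x in renamed_list if x == 6)
--     return 40 * n - 40 * zeros - 20 * sixes
-- ===== Notes on version B (the rewrite author's own statement) =====
-- stated objective: simpler
-- what changed: Replaces the element-by-element branch accumulator with count-based arithmetic: total = 40*len - 40*(count of 0/1/8) - 20*(count of 6).
import Mathlib
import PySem

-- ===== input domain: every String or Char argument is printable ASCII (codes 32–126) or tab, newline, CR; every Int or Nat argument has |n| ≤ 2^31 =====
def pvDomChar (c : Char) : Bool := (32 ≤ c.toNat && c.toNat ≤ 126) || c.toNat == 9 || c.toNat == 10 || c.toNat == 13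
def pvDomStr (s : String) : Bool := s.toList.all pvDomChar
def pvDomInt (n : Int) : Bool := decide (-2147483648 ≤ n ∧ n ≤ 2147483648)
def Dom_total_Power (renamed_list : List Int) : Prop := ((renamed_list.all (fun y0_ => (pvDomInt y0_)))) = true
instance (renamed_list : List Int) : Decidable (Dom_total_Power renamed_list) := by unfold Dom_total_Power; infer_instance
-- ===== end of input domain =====

-- B computes the total from counts (40*len - 40*count{0,1,8} - 20*count{6}) instead of a branch-per-element accumulator: simpler.


-- ===== PORT A =====
def total_Power (renamed_list : List Int) : Int :=
  renamed_list.foldl (fun esti_power i =>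
    if i == 0 || i == 1 then esti_power + 0
    else if i == 6 then esti_power + 20
    else if i == 7 then esti_power + 40
    else if i == 8 then esti_power + 0
    else if i == 9 then esti_power + 40
    else esti_power + 40) 0

-- ===== PORT B =====
def total_Power_alt (renamed_list : List Int) : Int :=
  let n : Int := renamed_list.length
  let zeros : Int := (renamed_list.countP (fun x => x == 0 || x == 1 || x == 8))
  let sixes : Int := (renamed_list.countP (fun x => x == 6))
  40 * n - 40 * zeros - 20 * sixes

-- ===== PRECONDITION & SPEC =====
def Spec_total_Power (renamed_list : List Int) (out : Int) : Prop := out = total_Power_alt renamed_list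
instance (renamed_list : List Int) (out : Int) : Decidable (Spec_total_Power renamed_list out) := by unfold Spec_total_Power; infer_instance

-- ===== CLAIM (what is proved, stated in full; the proofs are below) =====
def Claim_equal_total_Power : Prop := ∀ (renamed_list : List Int), Dom_total_Power renamed_list → Spec_total_Power renamed_list (total_Power renamed_list)

-- ===== LEMMAS AND PROOFS =====

-- foldl with offset start
theorem total_Power_foldl_shift (l : List Int) (a : Int) :
    l.foldl (fun esti_power i =>
      if i == 0 || i == 1 then esti_power + 0
      else if i == 6 then esti_power + 20
      else if i == 7 then esti_power + 40
      else if i == 8 then esti_power + 0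
      else if i == 9 then esti_power + 40
      else esti_power + 40) a = a + total_Power l := by
  induction l generalizing a with
  | nil => simp [total_Power]
  | cons x xs ih =>
    simp only [total_Power, List.foldl_cons]
    rw [ih, ih]
    split_ifs <;> ring

theorem total_Power_eq_alt (l : List Int) : total_Power l = total_Power_alt l := by
  induction l with
  | nil => simp [total_Power, total_Power_alt]
  | cons x xs ih =>
    have h : total_Power (x :: xs) =
        (if x == 0 || x == 1 then (0:Int) else if x == 6 then 20 else if x == 7 then 40
         else if x == 8 then 0 else if x == 9 then 40 else 40) + total_Power xs := by
      rw [total_Power, List.foldl_cons, total_Power_foldl_shift]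
      beta_reduce
      split_ifs <;> ring
    rw [h, ih]
    simp only [total_Power_alt, List.countP_cons, List.length_cons]
    by_cases h0 : x = 0 <;> by_cases h1 : x = 1 <;> by_cases h6 : x = 6 <;> by_cases h8 : x = 8 <;>
      simp_all <;> (try split_ifs) <;> push_cast <;> ring

-- ===== VERDICT (by name: the statement is the Claim_ definition above) =====
theorem total_Power_spec : Claim_equal_total_Power := by
  intro l _
  exact total_Power_eq_alt l
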